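-- pv_equiv track=rewrite | github.com/reentrant/python_exercises | algorithms/codesignal_tasks.py | possibleHeights
-- ===== SOURCE A (Python) =====
-- def possibleHeights(parent):
--
--     edges = [[] for i in range(len(parent))]
--     height = [0 for i in range(len(parent))]
--     isPossibleHeight = [False for i in range(len(parent))]
--
--     def initGraph(parent):
--         for i in range(1, len(parent)):
--             edges[parent[i]].append(i)
--
--     def calcHeight(v):
--         for u in edges[v]:
--             ...
--
--         countHeights = [[] for i in range(len(edges))]
--         for i in range(len(edges[v])):
--             u = edges[v][i]
--             countHeights[height[u]].append(u)
--         edges[v] = []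
--         for i in range(len(edges) - 1, -1, -1):
--             for j in range(len(countHeights[i])):
--                 edges[v].append(countHeights[i][j])
--
--     def findNewHeights(v, tailHeight):
--         isPossibleHeight[max(height[v], tailHeight)] = True
--         firstMaxHeight = tailHeight + 1
--         secondMaxHeight = tailHeight + 1
--         if len(edges[v]) > 0:
--             firstMaxHeight = max(firstMaxHeight, height[edges[v][0]] + 2)
--         if len(edges[v]) > 1:
--             secondMaxHeight = max(secondMaxHeight, height[edges[v][1]] + 2)
--         if len(edges[v]) > 0:
--             findNewHeights(edges[v][0], secondMaxHeight)
--         for i in range(1, len(edges[v])):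
--             findNewHeights(edges[v][i], firstMaxHeight)
--
--     initGraph(parent)
--     calcHeight(0)
--     findNewHeights(0, 0)
--
--     heights = []
--     for i in range(len(parent)):
--         if isPossibleHeight[i]:
--             heights.append(i)
--     return heights
-- ===== SOURCE B (Python) =====
-- def possibleHeights(parent):
--     n = len(parent)
--     children = [[] for _ in range(n)]
--     for i in range(1, n):
--         children[parent[i]].append(i)
--     possible = [False] * n
--     stack = [(0, 0)]
--     while stack:
--         v, t = stack.pop()
--         possible[t] = True
--         cs = children[v]
--         first = max(t + 1, 2) if cs else t + 1
--         second = max(t + 1, 2) if len(cs) > 1 else t + 1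
--         for u in reversed(cs[1:]):
--             stack.append((u, first))
--         if cs:
--             stack.append((cs[0], second))
--     return [i for i in range(n) if possible[i]]
-- ===== Notes on version B (the rewrite author's own statement) =====
-- stated objective: simpler
-- what changed: B replaces A's recursive findNewHeights with an explicit LIFO stack loop and deletes A's inert height/calcHeight machinery (heights are never updated, so max(height[v],t)=t and height[u]+2=2), keeping only the graph construction from the parent array.
import Mathlib
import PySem

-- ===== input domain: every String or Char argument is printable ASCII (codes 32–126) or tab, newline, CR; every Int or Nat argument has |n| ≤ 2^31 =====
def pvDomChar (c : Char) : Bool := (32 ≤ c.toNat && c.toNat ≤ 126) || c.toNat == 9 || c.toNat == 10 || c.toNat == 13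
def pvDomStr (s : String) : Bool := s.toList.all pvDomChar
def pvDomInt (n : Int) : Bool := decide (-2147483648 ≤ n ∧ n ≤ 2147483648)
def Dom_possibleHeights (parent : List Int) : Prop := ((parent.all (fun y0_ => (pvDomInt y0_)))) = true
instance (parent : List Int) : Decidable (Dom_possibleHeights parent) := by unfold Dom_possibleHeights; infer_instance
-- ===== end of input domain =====

-- B replaces A's recursive findNewHeights by an explicit LIFO stack and drops A's inert
-- height/calcHeight machinery (all heights stay 0), keeping the same graph construction:
-- objective "simpler". Equivalence is about the return value only.

-- ===== PORT A =====
-- Shared indexing helpers (Python list indexing with negative wraparound; out-of-range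
-- access raises in Python — such inputs are excluded by Pre_, the helpers no-op there).
def pyWrap (n : Nat) (i : Int) : Int := if i < 0 then i + n else i

def intGetD {α : Type} (xs : List α) (i : Int) (d : α) : α :=
  if 0 ≤ pyWrap xs.length i ∧ pyWrap xs.length i < (xs.length : Int) then
    xs.getD (pyWrap xs.length i).toNat d
  else d

def listSetAt {α : Type} (xs : List α) (i : Int) (x : α) : List α :=
  if 0 ≤ pyWrap xs.length i ∧ pyWrap xs.length i < (xs.length : Int) then
    xs.set (pyWrap xs.length i).toNat x
  else xs

def appendAt (xss : List (List Int)) (i : Int) (x : Int) : List (List Int) :=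
  listSetAt xss i (intGetD xss i [] ++ [x])

-- 'for i in range(1, len(parent)): edges[parent[i]].append(i)'  (both Pythons build this)
def initGraph (parent : List Int) : List (List Int) :=
  ((List.range parent.length).drop 1).foldl
    (fun e (i : Nat) => appendAt e (intGetD parent (i : Int) 0) (i : Int))
    (List.replicate parent.length [])

-- A's calcHeight(0): bucket the children of 0 by their (all-zero) heights, rebuild edges[0]
def calcHeightA (edges : List (List Int)) (height : List Int) : List (List Int) :=
  let e0 := intGetD edges 0 []
  let ch := e0.foldl (fun ch u => appendAt ch (intGetD height u 0) u)
      (List.replicate edges.length ([] : List Int))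
  let newE0 := ((List.range edges.length).reverse).foldl
      (fun acc (i : Nat) => acc ++ intGetD ch (i : Int) []) ([] : List Int)
  listSetAt edges 0 newE0

-- A's recursive findNewHeights.  `avail` is purely a TERMINATION GUARD: on inputs
-- satisfying Pre_ every node is reached at most once (each node has a unique in-edge),
-- so the guard never fires and the port computes exactly what the Python computes.
mutual
def recA (edges : List (List Int)) (height : List Int) (avail : Finset Nat)
    (v t : Int) (m : List Bool) : {r : Finset Nat × List Bool // r.1 ⊆ avail} :=
  if h : 0 ≤ v ∧ v.toNat ∈ avail then
    let m1 := listSetAt m (max (intGetD height v 0) t) true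
    let cs := intGetD edges v []
    let first := if 0 < cs.length then max (t + 1) (intGetD height (cs.getD 0 0) 0 + 2) else t + 1
    let second := if 1 < cs.length then max (t + 1) (intGetD height (cs.getD 1 0) 0 + 2) else t + 1
    let s1 : {r : Finset Nat × List Bool // r.1 ⊆ avail.erase v.toNat} :=
      if 0 < cs.length then recA edges height (avail.erase v.toNat) (cs.getD 0 0) second m1
      else ⟨(avail.erase v.toNat, m1), Finset.Subset.refl _⟩
    let s2 := recChildren edges height s1.1.1 cs.tail first s1.1.2
    ⟨s2.1, s2.2.trans (s1.2.trans (Finset.erase_subset _ _))⟩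
  else ⟨(avail, m), Finset.Subset.refl _⟩
termination_by (avail.card, 0)
decreasing_by
  · apply Prod.Lex.left; exact Finset.card_erase_lt_of_mem h.2
  · apply Prod.Lex.left
    exact lt_of_le_of_lt (Finset.card_le_card s1.2) (Finset.card_erase_lt_of_mem h.2)

-- 'for i in range(1, len(edges[v])): findNewHeights(edges[v][i], firstMaxHeight)'
def recChildren (edges : List (List Int)) (height : List Int) (avail : Finset Nat)
    (us : List Int) (first : Int) (m : List Bool) : {r : Finset Nat × List Bool // r.1 ⊆ avail} :=
  match us with
  | [] => ⟨(avail, m), Finset.Subset.refl _⟩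
  | u :: rest =>
    let s := recA edges height avail u first m
    let s2 := recChildren edges height s.1.1 rest first s.1.2
    ⟨s2.1, s2.2.trans s.2⟩
termination_by (avail.card, us.length + 1)
decreasing_by
  · apply Prod.Lex.right; simp
  · rcases lt_or_eq_of_le (Finset.card_le_card s.2) with h' | h'
    · exact Prod.Lex.left _ _ h'
    · rw [h']; apply Prod.Lex.right; simp
end

def possibleHeights (parent : List Int) : List Int :=
  let n := parent.length
  let height := List.replicate n (0 : Int)
  let edges := calcHeightA (initGraph parent) height
  let marks := (recA edges height (Finset.range n) 0 0 (List.replicate n false)).1.2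
  (List.range n).foldl (fun acc i => if marks.getD i false then acc ++ [(i : Int)] else acc) []

-- ===== PORT B =====
-- Explicit LIFO stack; pushing reversed(cs[1:]) then cs[0] means the popped task list is
-- (cs[0], second) :: (cs[1], first) :: … .  Same `avail` totality guard as in port A.
def loopB (children : List (List Int)) (stack : List (Int × Int)) (avail : Finset Nat)
    (m : List Bool) : List Bool :=
  match stack with
  | [] => m
  | (v, t) :: rest =>
    if _hg : 0 ≤ v ∧ v.toNat ∈ avail then
      let m1 := listSetAt m t true
      let cs := intGetD children v []
      let first := if 0 < cs.length then max (t + 1) 2 else t + 1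
      let second := if 1 < cs.length then max (t + 1) 2 else t + 1
      let pushed := if 0 < cs.length then (cs.getD 0 0, second) :: cs.tail.map (fun u => (u, first)) else []
      loopB children (pushed ++ rest) (avail.erase v.toNat) m1
    else loopB children rest avail m
termination_by (avail.card, stack.length)
decreasing_by
  · apply Prod.Lex.left; exact Finset.card_erase_lt_of_mem _hg.2
  · apply Prod.Lex.right; simp

def possibleHeights_alt (parent : List Int) : List Int :=
  let n := parent.length
  let children := initGraph parent
  let marks := loopB children [((0 : Int), (0 : Int))] (Finset.range n) (List.replicate n false)
  ((List.range n).filter (fun i => marks.getD i false)).map (fun i => (i : Int))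

-- ===== PRECONDITION & SPEC =====
-- Pre_ excludes exactly the inputs on which the Python A raises: the empty list
-- (IndexError on edges[0]) and lists where some parent[i], i ≥ 1, is out of range
-- as a Python index (IndexError in edges[parent[i]].append(i)).
def Pre_possibleHeights (parent : List Int) : Prop :=
  parent ≠ [] ∧ ∀ x ∈ parent.tail, -(parent.length : Int) ≤ x ∧ x < (parent.length : Int)
instance (parent : List Int) : Decidable (Pre_possibleHeights parent) := by
  unfold Pre_possibleHeights; infer_instance

def pvWitness_possibleHeights : List Int := [5, 0, 1, 0, -4]

def Spec_possibleHeights (parent : List Int) (out : List Int) : Prop := out = possibleHeights_alt parent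
instance (parent : List Int) (out : List Int) : Decidable (Spec_possibleHeights parent out) := by
  unfold Spec_possibleHeights; infer_instance

-- ===== CLAIM (what is proved, stated in full; the proofs are below) =====
def Claim_equal_possibleHeights : Prop := ∀ (parent : List Int), Dom_possibleHeights parent → Pre_possibleHeights parent → Spec_possibleHeights parent (possibleHeights parent)

-- ===== LEMMAS AND PROOFS =====

theorem intGetD_replicate_zero (n : Nat) (i : Int) :
    intGetD (List.replicate n (0 : Int)) i 0 = 0 := by
  unfold intGetD
  split
  · simp
  · rfl

theorem length_listSetAt {α : Type} (xs : List α) (i : Int) (x : α) :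
    (listSetAt xs i x).length = xs.length := by
  unfold listSetAt
  split <;> simp

theorem length_appendAt (xss : List (List Int)) (i : Int) (x : Int) :
    (appendAt xss i x).length = xss.length := by
  unfold appendAt; exact length_listSetAt _ _ _

theorem intGetD_natCast' {α : Type} (xs : List α) (i : Nat) (d : α) (h : i < xs.length) :
    intGetD xs (i : Int) d = xs.getD i d := by
  unfold intGetD pyWrap
  split_ifs with h1 h2 h3 <;> first | (exfalso; omega) | simp

theorem intGetD_zero_of_pos {α : Type} (xs : List α) (d : α) (h : 0 < xs.length) :
    intGetD xs 0 d = xs.getD 0 d := by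
  have := intGetD_natCast' xs 0 d h
  simpa using this

theorem listSetAt_zero_of_pos {α : Type} (xs : List α) (x : α) (h : 0 < xs.length) :
    listSetAt xs 0 x = xs.set 0 x := by
  unfold listSetAt pyWrap
  split_ifs with h1 h2 h3 <;> first | (exfalso; omega) | simp

theorem appendAt_zero_of_pos (xss : List (List Int)) (x : Int) (h : 0 < xss.length) :
    appendAt xss 0 x = xss.set 0 (xss.getD 0 [] ++ [x]) := by
  unfold appendAt
  rw [intGetD_zero_of_pos _ _ h, listSetAt_zero_of_pos _ _ h]

theorem length_foldl_initGraph (l : List Nat) (parent : List Int) (e : List (List Int)) :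
    (l.foldl (fun e (i : Nat) => appendAt e (intGetD parent (i : Int) 0) (i : Int)) e).length = e.length := by
  induction l generalizing e with
  | nil => rfl
  | cons a l ih => rw [List.foldl_cons, ih, length_appendAt]

theorem length_initGraph (parent : List Int) :
    (initGraph parent).length = parent.length := by
  unfold initGraph
  rw [length_foldl_initGraph]
  simp

theorem ch_fold (n : Nat) (hn : 0 < n) (l : List Int) : ∀ acc : List Int,
    l.foldl (fun ch u => appendAt ch (intGetD (List.replicate n (0 : Int)) u 0) u)
        ((List.replicate n ([] : List Int)).set 0 acc)
      = (List.replicate n ([] : List Int)).set 0 (acc ++ l) := by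
  induction l with
  | nil => intro acc; simp
  | cons u l ih =>
    intro acc
    rw [List.foldl_cons, intGetD_replicate_zero]
    have hlen : ((List.replicate n ([] : List Int)).set 0 acc).length = n := by simp
    rw [appendAt_zero_of_pos _ _ (by omega)]
    have hg : ((List.replicate n ([] : List Int)).set 0 acc).getD 0 [] = acc := by
      rw [List.getD_eq_getElem _ _ (by omega)]
      simp
    rw [hg, List.set_set, ih (acc ++ [u])]
    simp

theorem ch_fold0 (n : Nat) (hn : 0 < n) (l : List Int) :
    l.foldl (fun ch u => appendAt ch (intGetD (List.replicate n (0 : Int)) u 0) u)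
        (List.replicate n ([] : List Int))
      = (List.replicate n ([] : List Int)).set 0 l := by
  conv_lhs => rw [show (List.replicate n ([] : List Int))
    = (List.replicate n ([] : List Int)).set 0 [] from (List.set_replicate_self).symm]
  rw [ch_fold n hn l []]
  simp

theorem flatMap_ite (e0 : List Int) : ∀ n : Nat, 0 < n →
    ((List.range n).reverse).flatMap (fun i => if i = 0 then e0 else []) = e0 := by
  intro n
  induction n with
  | zero => omega
  | succ k ih =>
    intro _
    rw [show (List.range (k + 1)).reverse = k :: (List.range k).reverse by simp [List.range_succ]]
    rw [List.flatMap_cons]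
    by_cases hk : k = 0
    · subst hk; simp
    · rw [if_neg hk, ih (by omega)]; simp

theorem calcHeightA_id (e : List (List Int)) :
    calcHeightA e (List.replicate e.length 0) = e := by
  by_cases hn : e.length = 0
  · rw [List.eq_nil_of_length_eq_zero hn]
    rfl
  · have hn' : 0 < e.length := by omega
    unfold calcHeightA
    dsimp only
    rw [intGetD_zero_of_pos _ _ hn']
    rw [ch_fold0 e.length hn' _]
    have hch : ∀ acc : List Int, ∀ i ∈ (List.range e.length).reverse,
        acc ++ intGetD ((List.replicate e.length ([] : List Int)).set 0 (e.getD 0 [])) (i : Int) []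
          = acc ++ (if i = 0 then e.getD 0 [] else []) := by
      intro acc i hi
      have hi' : i < e.length := by
        have := List.mem_range.mp (List.mem_reverse.mp hi)
        omega
      rw [intGetD_natCast' _ _ _ (by simp; omega)]
      by_cases h0 : i = 0
      · subst h0
        rw [List.getD_eq_getElem _ _ (by simp; omega)]
        simp
      · rw [List.getD_eq_getElem _ _ (by simp; omega)]
        rw [List.getElem_set]
        rw [if_neg (by omega)]
        simp [h0]
    have hcongr := PySem.List.foldl_congr_mem (List.range e.length).reverse _ _ ([] : List Int)
      (fun acc i hi => hch acc i hi)
    rw [hcongr]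
    rw [PySem.List.foldl_append_eq_flatMap]
    rw [flatMap_ite _ _ hn', List.nil_append]
    rw [listSetAt_zero_of_pos _ _ hn']
    rw [List.getD_eq_getElem _ _ hn', List.set_getElem_self]

-- A's recursion extended to a worklist of (vertex, tailHeight) tasks
def runTasks (edges : List (List Int)) (height : List Int) (tasks : List (Int × Int))
    (avail : Finset Nat) (m : List Bool) : Finset Nat × List Bool :=
  match tasks with
  | [] => (avail, m)
  | (v, t) :: rest =>
    let s := recA edges height avail v t m
    runTasks edges height rest s.1.1 s.1.2

theorem runTasks_append (edges : List (List Int)) (height : List Int)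
    (a b : List (Int × Int)) (avail : Finset Nat) (m : List Bool) :
    runTasks edges height (a ++ b) avail m
      = runTasks edges height b (runTasks edges height a avail m).1 (runTasks edges height a avail m).2 := by
  induction a generalizing avail m with
  | nil => rfl
  | cons p rest ih => cases p; simp [runTasks, ih]

theorem recChildren_eq_runTasks (edges : List (List Int)) (height : List Int)
    (avail : Finset Nat) (us : List Int) (f : Int) (m : List Bool) :
    (recChildren edges height avail us f m).1
      = runTasks edges height (us.map (fun u => (u, f))) avail m := by
  induction us generalizing avail m with
  | nil => rw [recChildren]; rfl
  | cons u rest ih => rw [recChildren]; simp [runTasks, ih]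

theorem recA_skip (E : List (List Int)) (H : List Int) (avail : Finset Nat) (v t : Int)
    (m : List Bool) (h : ¬(0 ≤ v ∧ v.toNat ∈ avail)) :
    (recA E H avail v t m).1 = (avail, m) := by
  rw [recA]
  rw [dif_neg h]

-- one unfolding of A's recursion, with all-zero heights, expressed on the task worklist
theorem recA_step (E : List (List Int)) (n : Nat) (avail : Finset Nat) (v t : Int)
    (m : List Bool) (ht : 0 ≤ t) (hv : 0 ≤ v) (hm : v.toNat ∈ avail) :
    (recA E (List.replicate n (0 : Int)) avail v t m).1
      = runTasks E (List.replicate n (0 : Int))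
          (if 0 < (intGetD E v []).length then
              ((intGetD E v []).getD 0 0,
                if 1 < (intGetD E v []).length then max (t + 1) 2 else t + 1)
                :: (intGetD E v []).tail.map
                  (fun u => (u, if 0 < (intGetD E v []).length then max (t + 1) 2 else t + 1))
            else [])
          (avail.erase v.toNat) (listSetAt m t true) := by
  rw [recA, dif_pos ⟨hv, hm⟩]
  by_cases h0 : 0 < (intGetD E v []).length
  · simp only [recChildren_eq_runTasks, if_pos h0, runTasks]
    simp only [intGetD_replicate_zero, max_eq_right ht]
    norm_num
  · have hnil : intGetD E v [] = [] := List.eq_nil_of_length_eq_zero (by omega)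
    simp only [hnil, List.tail_nil]
    rw [recChildren]
    simp only [if_neg h0]
    simp only [intGetD_replicate_zero, max_eq_right ht]
    rfl

-- lockstep: the stack machine of B equals A's recursion run on the task worklist
theorem loopB_eq_runTasks (n : Nat) (E : List (List Int)) (stack : List (Int × Int))
    (avail : Finset Nat) (m : List Bool) :
    (∀ p ∈ stack, 0 ≤ p.2) →
    loopB E stack avail m
      = (runTasks E (List.replicate n (0 : Int)) stack avail m).2 := by
  fun_induction loopB E stack avail m
  all_goals intro hnn
  · rfl
  · rename_i avail m v t rest h m1 cs first second pushed ih
    have ht : 0 ≤ t := hnn (v, t) (List.mem_cons_self)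
    have hpush : ∀ p ∈ pushed ++ rest, 0 ≤ p.2 := by
      intro p hp
      rcases List.mem_append.mp hp with hp | hp
      · simp only [pushed, first, second] at hp
        split at hp
        · rcases List.mem_cons.mp hp with rfl | hp
          · dsimp only
            split <;> omega
          · rcases List.mem_map.mp hp with ⟨u, _, rfl⟩
            dsimp only
            omega
        · simp at hp
      · exact hnn p (List.mem_cons_of_mem _ hp)
    rw [ih hpush, runTasks_append]
    simp only [runTasks]
    simp only [pushed, m1, cs, first, second]
    simp only [dite_eq_ite]
    rw [← recA_step E n avail v t m ht h.1 h.2]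
  · rename_i avail m v t rest h ih
    have := recA_skip E (List.replicate n (0 : Int)) avail v t m h
    simp only [runTasks, this]
    exact ih (fun p hp => hnn p (List.mem_cons_of_mem _ hp))

theorem foldl_marks_eq (marks : List Bool) (n : Nat) :
    (List.range n).foldl (fun acc i => if marks.getD i false then acc ++ [(i : Int)] else acc) []
      = ((List.range n).filter (fun i => marks.getD i false)).map (fun i => (i : Int)) := by
  rw [PySem.List.foldl_append_if (fun i => marks.getD i false) (fun i => (i : Int)) (List.range n) []]
  simp [← List.map_eq_flatMap]

-- ===== VERDICT (by name: the statement is the Claim_ definition above) =====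
theorem possibleHeights_spec : Claim_equal_possibleHeights := by
  intro parent _ _
  unfold Spec_possibleHeights possibleHeights possibleHeights_alt
  dsimp only
  have hE : calcHeightA (initGraph parent) (List.replicate parent.length (0 : Int))
      = initGraph parent := by
    have h := calcHeightA_id (initGraph parent)
    rwa [length_initGraph] at h
  rw [hE]
  rw [loopB_eq_runTasks parent.length (initGraph parent) [((0 : Int), (0 : Int))]
    (Finset.range parent.length) (List.replicate parent.length false) (by simp)]
  rw [foldl_marks_eq]
  rfl
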